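-- pv_equiv track=rewrite | github.com/pehringer/spud | v2/assembler.py | bits
-- ===== SOURCE A (Python) =====
-- DATA_SIZE = 16
--
-- def bits(num):
-- 	bits = []
-- 	for i in range(DATA_SIZE):
-- 		if num % 2 == 1:
-- 			bits.append("1")
-- 		if num % 2 == 0:
-- 			bits.append("0")
-- 		num //= 2
-- 	return bits
-- ===== SOURCE B (Python) =====
-- def bits(num):
--     return list(format(num % 65536, "016b"))[::-1]
-- ===== Notes on version B (the rewrite author's own statement) =====
-- stated objective: idiomatic
-- what changed: Replaces the per-bit divide-and-test loop with a closed form: reduce num modulo the sixteen-bit data width, render it as a zero-padded binary string via format(..., '016b') and reverse the characters into the LSB-first list.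
import Mathlib
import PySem

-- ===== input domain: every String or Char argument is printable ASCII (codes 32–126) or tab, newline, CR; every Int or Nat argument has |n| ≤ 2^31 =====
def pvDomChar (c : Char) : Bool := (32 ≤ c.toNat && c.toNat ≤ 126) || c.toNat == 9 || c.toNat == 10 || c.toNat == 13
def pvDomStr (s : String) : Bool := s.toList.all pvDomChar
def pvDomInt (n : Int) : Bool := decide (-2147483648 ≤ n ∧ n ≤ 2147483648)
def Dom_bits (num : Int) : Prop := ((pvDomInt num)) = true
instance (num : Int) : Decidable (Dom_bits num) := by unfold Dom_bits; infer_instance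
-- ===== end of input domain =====

-- B replaces A's 16-step divide-and-test loop with a closed form: num mod 2^16,
-- formatted as a 16-digit binary string (MSB first) and reversed (idiomatic, same cost).

-- ===== PORT A =====
-- A: for i in range(16): if num % 2 == 1 append "1"; if num % 2 == 0 append "0"; num //= 2
def bitsStep (st : List String × Int) (_i : Nat) : List String × Int :=
  let bs := if PySem.Int.mod st.2 2 = 1 then st.1 ++ ["1"] else st.1
  let bs := if PySem.Int.mod st.2 2 = 0 then bs ++ ["0"] else bs
  (bs, PySem.Int.floordiv st.2 2)

def bits (num : Int) : List String :=
  ((List.range 16).foldl bitsStep ([], num)).1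

-- ===== PORT B =====
-- format(m, "016b"): the 16 binary digits of m (0 ≤ m < 2^16), most significant first
def fmt016b (m : Nat) : List String :=
  (List.range 16).map (fun i => if m.testBit (15 - i) then "1" else "0")

def bits_alt (num : Int) : List String :=
  (fmt016b (PySem.Int.mod num 65536).toNat).reverse

-- ===== PRECONDITION & SPEC =====
def Spec_bits (num : Int) (out : List String) : Prop := out = bits_alt num
instance (num : Int) (out : List String) : Decidable (Spec_bits num out) := by unfold Spec_bits; infer_instance

-- ===== CLAIM (what is proved, stated in full; the proofs are below) =====
def Claim_equal_bits : Prop := ∀ (num : Int), Dom_bits num → Spec_bits num (bits num)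

-- ===== LEMMAS AND PROOFS =====

-- iterated 'num //= 2' (ediv = Python floor division, the divisor being positive)
def chain (n : Int) : Nat → Int
  | 0 => n
  | i + 1 => chain n i / 2

theorem step_eq (bs : List String) (n : Int) (i : Nat) :
    bitsStep (bs, n) i = (bs ++ [if n % 2 = 1 then "1" else "0"], n / 2) := by
  have hm : PySem.Int.mod n 2 = n % 2 := PySem.Int.mod_eq_emod_of_pos (by norm_num)
  have hd : PySem.Int.floordiv n 2 = n / 2 := PySem.Int.floordiv_eq_ediv_of_pos (by norm_num)
  simp only [bitsStep, hm, hd]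
  rcases Int.emod_two_eq n with h | h <;> rw [h] <;> norm_num

theorem loop_eq (k : Nat) (n : Int) (acc : List String) :
    (List.range k).foldl bitsStep (acc, n) =
      (acc ++ (List.range k).map (fun i => if chain n i % 2 = 1 then "1" else "0"),
       chain n k) := by
  induction k generalizing acc with
  | zero => simp [chain]
  | succ k ih =>
      rw [List.range_succ, List.foldl_append, ih, List.map_append]
      simp [step_eq, chain, List.append_assoc]

theorem chain_bit (n : Int) (j : Nat) (hj : j < 16) :
    (chain n j % 2 = 1) ↔ (PySem.Int.mod n 65536).toNat.testBit j := by
  have hm : PySem.Int.mod n 65536 = n % 65536 := PySem.Int.mod_eq_emod_of_pos (by norm_num)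
  rw [hm, Nat.testBit_eq_decide_div_mod_eq]
  have ht : ((n % 65536).toNat : Int) = n % 65536 := Int.toNat_of_nonneg (by omega)
  interval_cases j <;>
    · simp only [chain, decide_eq_true_eq, pow_succ, pow_zero, one_mul]
      norm_num
      omega

theorem bits_chain (n : Int) :
    bits n = (List.range 16).map (fun i => if chain n i % 2 = 1 then "1" else "0") := by
  simp [bits, loop_eq]

-- ===== VERDICT (by name: the statement is the Claim_ definition above) =====
theorem bits_spec : Claim_equal_bits := by
  intro n _
  unfold Spec_bits bits_alt fmt016b
  rw [bits_chain]
  apply List.ext_getElem (by simp)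
  intro j h1 h2
  simp only [List.getElem_reverse, List.getElem_map, List.getElem_range,
    List.length_map, List.length_range]
  simp only [List.length_reverse, List.length_map, List.length_range] at h1 h2
  have hj : 15 - (16 - 1 - j) = j := by omega
  rw [hj]
  have hb := chain_bit n j (by omega)
  by_cases hcb : chain n j % 2 = 1
  · rw [if_pos hcb, if_pos (hb.mp hcb)]
  · rw [if_neg hcb, if_neg (fun hh => hcb (hb.mpr hh))]
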